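-- pv_equiv track=rewrite | github.com/estelledoriot/NSI_1ere_Buffon_2020_2021 | 10_exos_structures_2.py | infernale
-- ===== SOURCE A (Python) =====
-- def infernale(annee):
--     mois = [0, 31, 28, 31, 30, 31, 30, 31, 31, 30, 31, 30]
--     compteur = 0
--     nb_jours = 0
--     for i in range(1900, annee):
--         if i == 1900:
--             nb_jours += 365
--         elif i % 4 == 0:
--             nb_jours += 366
--         else:
--             nb_jours += 365
--     for i in range(12):
--         if annee != 1900 and annee % 4 == 0 and i == 2:
--             nb_jours += mois[i] + 1
--         else:
--             nb_jours += mois[i]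
--         reste = (nb_jours + 12) % 7
--         if reste == 4:
--             compteur = compteur + 1
--     return compteur == 3
-- ===== SOURCE B (Python) =====
-- def infernale(annee):
--     mois = [0, 31, 28, 31, 30, 31, 30, 31, 31, 30, 31, 30]
--     if annee > 1900:
--         nb_jours = 365 * (annee - 1900) + (annee - 1) // 4 - 475
--     else:
--         nb_jours = 0
--     bissextile = annee != 1900 and annee % 4 == 0
--     compteur = 0
--     for i in range(12):
--         nb_jours += mois[i] + (1 if bissextile and i == 2 else 0)
--         if (nb_jours + 12) % 7 == 4:
--             compteur += 1
--     return compteur == 3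
-- ===== Notes on version B (the rewrite author's own statement) =====
-- stated objective: faster
-- what changed: Replaced A's year-by-year day-count loop with a closed-form expression (a constant per elapsed year plus a floor-division count of the leap years), keeping the fixed per-month scan.
import Mathlib
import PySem

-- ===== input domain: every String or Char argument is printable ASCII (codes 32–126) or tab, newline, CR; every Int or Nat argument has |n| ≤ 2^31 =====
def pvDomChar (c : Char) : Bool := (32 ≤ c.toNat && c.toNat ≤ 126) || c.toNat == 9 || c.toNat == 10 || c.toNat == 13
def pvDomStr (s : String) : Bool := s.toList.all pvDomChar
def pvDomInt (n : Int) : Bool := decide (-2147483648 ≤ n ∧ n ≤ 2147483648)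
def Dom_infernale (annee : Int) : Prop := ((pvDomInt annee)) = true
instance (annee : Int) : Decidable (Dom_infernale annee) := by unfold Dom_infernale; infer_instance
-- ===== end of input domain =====

-- B replaces A's linear year-by-year day-count loop with a closed-form
-- leap-year count via floor division, keeping the fixed per-month scan. (objective: faster)

-- ===== PORT A =====
def infA_step1 (nb i : Int) : Int :=
  if i = 1900 then nb + 365
  else if PySem.Int.mod i 4 = 0 then nb + 366
  else nb + 365

def infA_step2 (annee : Int) (mois : List Int) (st : Int × Int) (i : Int) : Int × Int :=
  let nb := if annee ≠ 1900 ∧ PySem.Int.mod annee 4 = 0 ∧ i = 2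
            then st.2 + PySem.List.pyGetD mois i 0 + 1
            else st.2 + PySem.List.pyGetD mois i 0
  let reste := PySem.Int.mod (nb + 12) 7
  (if reste = 4 then st.1 + 1 else st.1, nb)

def infernale (annee : Int) : Bool :=
  let mois : List Int := [0, 31, 28, 31, 30, 31, 30, 31, 31, 30, 31, 30]
  -- mois[i] for i ∈ range(12) is always in range, so pyGetD is exact here
  let nb_jours := (PySem.List.pyRange 1900 annee 1).foldl infA_step1 0
  let st := (PySem.List.pyRange 0 12 1).foldl (infA_step2 annee mois) (0, nb_jours)
  st.1 == 3

-- ===== PORT B =====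
def infB_step (bissextile : Bool) (mois : List Int) (st : Int × Int) (i : Int) : Int × Int :=
  let nb := st.2 + PySem.List.pyGetD mois i 0 + (if bissextile && (i == 2) then 1 else 0)
  (if PySem.Int.mod (nb + 12) 7 = 4 then st.1 + 1 else st.1, nb)

def infernale_alt (annee : Int) : Bool :=
  let mois : List Int := [0, 31, 28, 31, 30, 31, 30, 31, 31, 30, 31, 30]
  let nb_jours : Int :=
    if annee > 1900
    then 365 * (annee - 1900) + PySem.Int.floordiv (annee - 1) 4 - 475
    else 0
  let bissextile : Bool := (annee != 1900) && (PySem.Int.mod annee 4 == 0)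
  let st := (PySem.List.pyRange 0 12 1).foldl (infB_step bissextile mois) (0, nb_jours)
  st.1 == 3

-- ===== PRECONDITION & SPEC =====
def Spec_infernale (annee : Int) (out : Bool) : Prop := out = infernale_alt annee
instance (annee : Int) (out : Bool) : Decidable (Spec_infernale annee out) := by unfold Spec_infernale; infer_instance

-- ===== CLAIM (what is proved, stated in full; the proofs are below) =====
def Claim_equal_infernale : Prop := ∀ (annee : Int), Dom_infernale annee → Spec_infernale annee (infernale annee)

-- ===== LEMMAS AND PROOFS =====

-- the two month-loop step functions agree
lemma step2_eq (annee : Int) (mois : List Int) :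
    infA_step2 annee mois = infB_step ((annee != 1900) && (PySem.Int.mod annee 4 == 0)) mois := by
  funext st i
  by_cases h1 : annee = 1900 <;> by_cases h2 : (4 : Int) ∣ annee <;>
    by_cases h3 : i = 2 <;>
    simp [infA_step2, infB_step, h1, h2, h3]

-- closed form for A's year loop, on annee = 1901 + n
lemma loop1_aux (n : Nat) :
    (PySem.List.pyRange 1900 (1901 + (n : Int)) 1).foldl infA_step1 0
      = 365 * ((n : Int) + 1) + PySem.Int.floordiv (1900 + (n : Int)) 4 - 475 := by
  induction n with
  | zero => decide
  | succ n ih =>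
      have h : (1901 : Int) + ((n : Int) + 1) = (1901 + (n : Int)) + 1 := by ring
      push_cast
      rw [h, PySem.List.pyRange_one_succ_right (by omega), List.foldl_append, ih]
      simp only [List.foldl]
      rw [infA_step1]
      have h4 : PySem.Int.mod (1901 + (n : Int)) 4 = (1901 + (n : Int)) % 4 :=
        PySem.Int.mod_eq_emod_of_pos (by norm_num)
      have hd1 : PySem.Int.floordiv (1900 + (n : Int)) 4 = (1900 + (n : Int)) / 4 :=
        PySem.Int.floordiv_eq_ediv_of_pos (by norm_num)
      have hd2 : PySem.Int.floordiv (1900 + ((n : Int) + 1)) 4 = (1900 + (n : Int) + 1) / 4 := by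
        rw [PySem.Int.floordiv_eq_ediv_of_pos (by norm_num)]; ring_nf
      rw [h4, hd1, hd2]
      have hne : (1901 : Int) + (n : Int) ≠ 1900 := by omega
      split_ifs <;> omega

-- closed form for A's year loop, every annee
lemma loop1 (annee : Int) :
    (PySem.List.pyRange 1900 annee 1).foldl infA_step1 0
      = if annee > 1900
        then 365 * (annee - 1900) + PySem.Int.floordiv (annee - 1) 4 - 475
        else 0 := by
  by_cases h : annee > 1900
  · have hn : annee = 1901 + ((annee - 1901).toNat : Int) := by omega
    rw [hn]
    rw [loop1_aux]
    simp only [if_pos (show (1901 : Int) + ((annee - 1901).toNat : Int) > 1900 by omega)]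
    have : (1901 : Int) + ((annee - 1901).toNat : Int) - 1 = 1900 + ((annee - 1901).toNat : Int) := by ring
    rw [this]
    ring_nf
  · rw [PySem.List.pyRange_one_eq_nil (by omega)]
    simp [h]

-- ===== VERDICT (by name: the statement is the Claim_ definition above) =====
theorem infernale_spec : Claim_equal_infernale := by
  intro annee _
  unfold Spec_infernale infernale infernale_alt
  simp only [loop1, step2_eq]
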